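-- pv_equiv track=rewrite | github.com/garimto81/virtual_table_db_gpt | projects/poker-gfx/docs/extract_detailed_sections.py | extract_api_integration
-- ===== SOURCE A (Python) =====
-- def extract_api_integration(text):
--     """API 통합 관련 내용 추출"""
--     details = {
--         'endpoints': [],
--         'websocket_events': [],
--         'authentication': [],
--         'examples': [],
--         'enterprise_features': []
--     }
--
--     lines = text.split('\n')
--     in_api_section = False
--
--     for line in lines:
--         if 'Live API' in line or 'API' in line and 'Enterprise' in line:
--             in_api_section = True
--         elif in_api_section and 'PAGE' in line:
--             in_api_section = False
--
--         if in_api_section or 'api' in line.lower():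
--             # 엔드포인트
--             if '/' in line and any(word in line.lower() for word in ['api', 'endpoint']):
--                 details['endpoints'].append(line.strip())
--
--             # WebSocket 이벤트
--             if 'websocket' in line.lower() or 'ws://' in line:
--                 details['websocket_events'].append(line.strip())
--
--             # 인증
--             if any(word in line.lower() for word in ['auth', 'token', 'key']):
--                 details['authentication'].append(line.strip())
--
--             # 예제
--             if any(word in line.lower() for word in ['example', 'sample', 'code']):
--                 details['examples'].append(line.strip())
--
--             # 엔터프라이즈 기능
--             if 'enterprise' in line.lower():
--                 details['enterprise_features'].append(line.strip())
--
--     return details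
-- ===== SOURCE B (Python) =====
-- def extract_api_integration(text):
--     """Two-phase rewrite: first collect the active lines with the section
--     state machine, then build each category with its own filtering pass."""
--     active = []
--     in_api_section = False
--     for line in text.split('\n'):
--         if 'Live API' in line or 'API' in line and 'Enterprise' in line:
--             in_api_section = True
--         elif in_api_section and 'PAGE' in line:
--             in_api_section = False
--         if in_api_section or 'api' in line.lower():
--             active.append(line)
--     return {
--         'endpoints': [l.strip() for l in active
--                       if '/' in l and ('api' in l.lower() or 'endpoint' in l.lower())],
--         'websocket_events': [l.strip() for l in active
--                              if 'websocket' in l.lower() or 'ws://' in l],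
--         'authentication': [l.strip() for l in active
--                            if 'auth' in l.lower() or 'token' in l.lower() or 'key' in l.lower()],
--         'examples': [l.strip() for l in active
--                      if 'example' in l.lower() or 'sample' in l.lower() or 'code' in l.lower()],
--         'enterprise_features': [l.strip() for l in active if 'enterprise' in l.lower()],
--     }
-- ===== Notes on version B (the rewrite author's own statement) =====
-- stated objective: alternative
-- what changed: Replaces A's single fused loop (state machine plus five conditional appends per line) by a two-phase decomposition: one pass builds the list of active lines, then each of the five categories is produced by its own independent filter-and-strip pass over that list.
import Mathlib
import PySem

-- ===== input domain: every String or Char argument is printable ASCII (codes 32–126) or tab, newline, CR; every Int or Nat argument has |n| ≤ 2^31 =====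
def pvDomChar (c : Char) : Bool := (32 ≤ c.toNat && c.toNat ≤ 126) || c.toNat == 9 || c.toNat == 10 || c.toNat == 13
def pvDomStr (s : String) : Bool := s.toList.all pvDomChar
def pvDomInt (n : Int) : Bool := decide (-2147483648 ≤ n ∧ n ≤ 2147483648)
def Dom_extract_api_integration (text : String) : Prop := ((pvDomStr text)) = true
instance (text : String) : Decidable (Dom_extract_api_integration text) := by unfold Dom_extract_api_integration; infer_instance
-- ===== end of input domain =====

-- B re-implements A as a two-phase decomposition (collect active lines, then five independent
-- filter passes) instead of A's single fused loop; same value everywhere, no speed change.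

-- ===== PORT A =====
-- A-side helper: the body of A's single for-loop (state machine fused with the five appends)
def pvAStep (st : Bool × List String × List String × List String × List String × List String)
    (line : String) : Bool × List String × List String × List String × List String × List String :=
  let (b0, e, w, au, ex, ent) := st
  let b := if PySem.Str.isIn "Live API" line ||
              (PySem.Str.isIn "API" line && PySem.Str.isIn "Enterprise" line) then true
           else if b0 && PySem.Str.isIn "PAGE" line then false else b0
  if b || PySem.Str.isIn "api" (PySem.Str.lower line) then
    let e := if PySem.Str.isIn "/" line &&
                (PySem.Str.isIn "api" (PySem.Str.lower line) ||
                 PySem.Str.isIn "endpoint" (PySem.Str.lower line))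
             then e ++ [PySem.Str.strip line] else e
    let w := if PySem.Str.isIn "websocket" (PySem.Str.lower line) || PySem.Str.isIn "ws://" line
             then w ++ [PySem.Str.strip line] else w
    let au := if PySem.Str.isIn "auth" (PySem.Str.lower line) ||
                 PySem.Str.isIn "token" (PySem.Str.lower line) ||
                 PySem.Str.isIn "key" (PySem.Str.lower line)
              then au ++ [PySem.Str.strip line] else au
    let ex := if PySem.Str.isIn "example" (PySem.Str.lower line) ||
                 PySem.Str.isIn "sample" (PySem.Str.lower line) ||
                 PySem.Str.isIn "code" (PySem.Str.lower line)
              then ex ++ [PySem.Str.strip line] else ex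
    let ent := if PySem.Str.isIn "enterprise" (PySem.Str.lower line)
               then ent ++ [PySem.Str.strip line] else ent
    (b, e, w, au, ex, ent)
  else (b, e, w, au, ex, ent)

def extract_api_integration (text : String) : List (String × List String) :=
  let st := ((PySem.Str.split? text "\n").getD []).foldl pvAStep (false, [], [], [], [], [])
  [("endpoints", st.2.1), ("websocket_events", st.2.2.1), ("authentication", st.2.2.2.1),
   ("examples", st.2.2.2.2.1), ("enterprise_features", st.2.2.2.2.2)]

-- ===== PORT B =====
-- B-side helper: phase 1, the state machine collecting the active lines only
def pvBStep (st : Bool × List String) (line : String) : Bool × List String :=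
  let b := if PySem.Str.isIn "Live API" line ||
              (PySem.Str.isIn "API" line && PySem.Str.isIn "Enterprise" line) then true
           else if st.1 && PySem.Str.isIn "PAGE" line then false else st.1
  if b || PySem.Str.isIn "api" (PySem.Str.lower line) then (b, st.2 ++ [line]) else (b, st.2)

def extract_api_integration_alt (text : String) : List (String × List String) :=
  let active := (((PySem.Str.split? text "\n").getD []).foldl pvBStep (false, [])).2
  [("endpoints", (active.filter (fun l => PySem.Str.isIn "/" l &&
        (PySem.Str.isIn "api" (PySem.Str.lower l) ||
         PySem.Str.isIn "endpoint" (PySem.Str.lower l)))).map PySem.Str.strip),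
   ("websocket_events", (active.filter (fun l => PySem.Str.isIn "websocket" (PySem.Str.lower l) ||
        PySem.Str.isIn "ws://" l)).map PySem.Str.strip),
   ("authentication", (active.filter (fun l => PySem.Str.isIn "auth" (PySem.Str.lower l) ||
        PySem.Str.isIn "token" (PySem.Str.lower l) ||
        PySem.Str.isIn "key" (PySem.Str.lower l))).map PySem.Str.strip),
   ("examples", (active.filter (fun l => PySem.Str.isIn "example" (PySem.Str.lower l) ||
        PySem.Str.isIn "sample" (PySem.Str.lower l) ||
        PySem.Str.isIn "code" (PySem.Str.lower l))).map PySem.Str.strip),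
   ("enterprise_features", (active.filter (fun l =>
        PySem.Str.isIn "enterprise" (PySem.Str.lower l))).map PySem.Str.strip)]

-- ===== PRECONDITION & SPEC =====
def Spec_extract_api_integration (text : String) (out : List (String × List String)) : Prop := out = extract_api_integration_alt text
instance (text : String) (out : List (String × List String)) : Decidable (Spec_extract_api_integration text out) := by unfold Spec_extract_api_integration; infer_instance

-- ===== CLAIM (what is proved, stated in full; the proofs are below) =====
def Claim_equal_extract_api_integration : Prop := ∀ (text : String), Dom_extract_api_integration text → Spec_extract_api_integration text (extract_api_integration text)

-- ===== LEMMAS AND PROOFS =====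

-- proof-side helpers: the shared state transition and the active-line sequence
def pvNext (b : Bool) (line : String) : Bool :=
  if PySem.Str.isIn "Live API" line ||
     (PySem.Str.isIn "API" line && PySem.Str.isIn "Enterprise" line) then true
  else if b && PySem.Str.isIn "PAGE" line then false else b

def pvActCond (b : Bool) (line : String) : Bool :=
  b || PySem.Str.isIn "api" (PySem.Str.lower line)

def pvAct (b : Bool) : List String → List String
  | [] => []
  | l :: ls =>
    let b' := pvNext b l
    if pvActCond b' l then l :: pvAct b' ls else pvAct b' ls

lemma pvBStep_eq (st : Bool × List String) (l : String) :
    pvBStep st l = if pvActCond (pvNext st.1 l) l then (pvNext st.1 l, st.2 ++ [l])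
                   else (pvNext st.1 l, st.2) := by
  simp [pvBStep, pvNext, pvActCond]

lemma pvB_foldl (ls : List String) (b : Bool) (acc : List String) :
    (ls.foldl pvBStep (b, acc)).2 = acc ++ pvAct b ls := by
  induction ls generalizing b acc with
  | nil => simp [pvAct]
  | cons l ls ih =>
    simp only [List.foldl_cons, pvBStep_eq, pvAct]
    split <;> simp [ih]

def pvCE (l : String) : Bool := PySem.Str.isIn "/" l &&
  (PySem.Str.isIn "api" (PySem.Str.lower l) || PySem.Str.isIn "endpoint" (PySem.Str.lower l))
def pvCW (l : String) : Bool := PySem.Str.isIn "websocket" (PySem.Str.lower l) || PySem.Str.isIn "ws://" l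
def pvCA (l : String) : Bool := PySem.Str.isIn "auth" (PySem.Str.lower l) ||
  PySem.Str.isIn "token" (PySem.Str.lower l) || PySem.Str.isIn "key" (PySem.Str.lower l)
def pvCX (l : String) : Bool := PySem.Str.isIn "example" (PySem.Str.lower l) ||
  PySem.Str.isIn "sample" (PySem.Str.lower l) || PySem.Str.isIn "code" (PySem.Str.lower l)
def pvCN (l : String) : Bool := PySem.Str.isIn "enterprise" (PySem.Str.lower l)

lemma ite_append_singleton (c : Bool) (e : List String) (x : String) :
    (if c then e ++ [x] else e) = e ++ (if c then [x] else []) := by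
  cases c <;> simp

lemma pvAStep_eq (b : Bool) (e w au ex ent : List String) (l : String) :
    pvAStep (b, e, w, au, ex, ent) l =
      if pvActCond (pvNext b l) l then
        (pvNext b l,
         e ++ (if pvCE l then [PySem.Str.strip l] else []),
         w ++ (if pvCW l then [PySem.Str.strip l] else []),
         au ++ (if pvCA l then [PySem.Str.strip l] else []),
         ex ++ (if pvCX l then [PySem.Str.strip l] else []),
         ent ++ (if pvCN l then [PySem.Str.strip l] else []))
      else (pvNext b l, e, w, au, ex, ent) := by
  simp only [pvAStep, pvNext, pvActCond, pvCE, pvCW, pvCA, pvCX, pvCN, ite_append_singleton]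
  rfl

lemma pvComp (p : String → Bool) (e r : List String) (l : String) :
    (e ++ (if p l then [PySem.Str.strip l] else [])) ++ (r.filter p).map PySem.Str.strip
      = e ++ ((l :: r).filter p).map PySem.Str.strip := by
  cases h : p l <;> simp [h]

lemma pvA_foldl (ls : List String) (b : Bool) (e w au ex ent : List String) :
    ls.foldl pvAStep (b, e, w, au, ex, ent) =
      (ls.foldl pvNext b,
       e ++ ((pvAct b ls).filter pvCE).map PySem.Str.strip,
       w ++ ((pvAct b ls).filter pvCW).map PySem.Str.strip,
       au ++ ((pvAct b ls).filter pvCA).map PySem.Str.strip,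
       ex ++ ((pvAct b ls).filter pvCX).map PySem.Str.strip,
       ent ++ ((pvAct b ls).filter pvCN).map PySem.Str.strip) := by
  induction ls generalizing b e w au ex ent with
  | nil => simp [pvAct]
  | cons l ls ih =>
    simp only [List.foldl_cons, pvAStep_eq, pvAct]
    by_cases h : pvActCond (pvNext b l) l = true
    · simp only [if_pos h, ih, pvComp]
    · simp only [if_neg h, ih]

-- ===== VERDICT (by name: the statement is the Claim_ definition above) =====
theorem extract_api_integration_spec : Claim_equal_extract_api_integration := by
  intro text _
  show extract_api_integration text = extract_api_integration_alt text
  unfold extract_api_integration extract_api_integration_alt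
  rw [pvA_foldl, pvB_foldl]
  rfl
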